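-- pv_equiv track=rewrite | github.com/zahlman/json_bpatch | setup.py | interpret_dev_status
-- ===== SOURCE A (Python) =====
-- def interpret_dev_status(status):
--     names = 'Planning Pre-Alpha Alpha Beta Production/Stable Mature Inactive'
--     mapping = {}
--     for i, name in enumerate(names.split(), 1):
--         k, v = name.lower(), '{} - {}'.format(i, name)
--         mapping[k] = v
--         mapping[i] = v
--         mapping[k.replace('-', '')] = v
--         for c in k.split('/'):
--             mapping[c] = v
--
--     try:
--         status = int(status[0]) # string starting with a digit?
--     except:
--         pass
--
--     try:
--         return mapping[status]
--     except KeyError: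
--         raise ValueError(''.join(
--             'invalid development status: must be integer 1-7,',
--             'or string beginning with digit 1-7,',
--             'or valid development status name'
--         ))
-- ===== SOURCE B (Python) =====
-- def interpret_dev_status(status):
--     # Inverted strategy vs A: normalize the query (strip hyphens) and resolve it
--     # through one literal alias->index table, instead of expanding every name
--     # into all alias spellings; format the result line once at the end.
--     names = ('Planning', 'Pre-Alpha', 'Alpha', 'Beta',
--              'Production/Stable', 'Mature', 'Inactive')
--     index = {'planning': 1, 'prealpha': 2, 'alpha': 3, 'beta': 4,
--              'production/stable': 5, 'production': 5, 'stable': 5,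
--              'mature': 6, 'inactive': 7}
--     try:
--         status = int(status[0])  # string starting with a digit?
--     except Exception:
--         pass
--     if isinstance(status, int):
--         i = status
--     else:
--         i = index.get(status.replace('-', ''), 0)
--     if 1 <= i <= 7:
--         return '{} - {}'.format(i, names[i - 1])
--     raise ValueError('invalid development status: must be integer 1-7, '
--                      'or string beginning with digit 1-7, '
--                      'or valid development status name')
-- ===== Notes on version B (the rewrite author's own statement) =====
-- stated objective: simpler
-- what changed: B inverts A's strategy: instead of expanding every name into all its alias spellings with a triple-nested loop building a mixed-key dict of formatted strings, B normalizes the query (hyphens stripped) and resolves it through one small literal alias-to-index table, formatting the result line once at the end; its error path raises a working ValueError instead of A's broken multi-argument ''.join (TypeError).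
-- outside the precondition, e.g. on interpret_dev_status(''): A raises TypeError, B raises ValueError
import Mathlib
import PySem

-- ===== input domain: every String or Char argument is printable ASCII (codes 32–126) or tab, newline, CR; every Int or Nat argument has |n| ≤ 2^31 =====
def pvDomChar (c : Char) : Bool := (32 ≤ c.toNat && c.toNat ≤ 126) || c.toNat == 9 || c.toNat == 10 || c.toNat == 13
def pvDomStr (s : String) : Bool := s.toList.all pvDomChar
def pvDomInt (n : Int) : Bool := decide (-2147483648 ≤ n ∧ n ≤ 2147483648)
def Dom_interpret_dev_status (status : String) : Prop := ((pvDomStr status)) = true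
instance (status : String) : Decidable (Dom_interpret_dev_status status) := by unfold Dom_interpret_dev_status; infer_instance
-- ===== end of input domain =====

set_option maxRecDepth 8000
set_option maxHeartbeats 2000000


-- B inverts A's strategy: it normalizes the input and looks it up in one literal alias→index
-- table instead of expanding every name into all alias spellings (simpler); equivalence is on
-- the return value where A returns.

-- ===== PORT A =====
-- Python dict with mixed int/str keys: modelled as PySem.Dict over (Int ⊕ String).
-- enumerate(names.split(), 1) = PySem.List.enumerate … 1.
def interpret_dev_status (status : String) : String :=
  let names := "Planning Pre-Alpha Alpha Beta Production/Stable Mature Inactive"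
  let mapping : PySem.Dict (Int ⊕ String) String :=
    (PySem.List.enumerate (PySem.Str.split₀ names) 1).foldl
      (fun mapping p =>
        let i := p.1
        let name := p.2
        let k := PySem.Str.lower name
        let v := PySem.Int.toStr i ++ " - " ++ name
        let mapping := mapping.insert (.inr k) v
        let mapping := mapping.insert (.inl i) v
        let mapping := mapping.insert (.inr (PySem.Str.replace k "-" "")) v
        ((PySem.Str.split? k "/").getD []).foldl
          (fun m c => m.insert (.inr c) v) mapping)
      PySem.Dict.empty
  -- try: status = int(status[0]) except: pass
  let key : Int ⊕ String :=
    match (PySem.Str.pyGet? status 0).bind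
            (fun ch => PySem.Int.ofStr? (String.ofList [ch])) with
    | some n => .inl n
    | none => .inr status
  match mapping.get? key with
  | some v => v
  | none => ""   -- Python raises (TypeError from the broken ''.join) here; excluded by Pre_

-- ===== PORT B =====
-- the literal dict 'index' of Source B: an association-list literal looked up first-match
-- (exact: the literal has no duplicate keys).
def interpret_dev_status_alt (status : String) : String :=
  let names := ["Planning", "Pre-Alpha", "Alpha", "Beta",
                "Production/Stable", "Mature", "Inactive"]
  let index : List (String × Int) :=
    [("planning", 1), ("prealpha", 2), ("alpha", 3), ("beta", 4),
     ("production/stable", 5), ("production", 5), ("stable", 5),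
     ("mature", 6), ("inactive", 7)]
  -- try: status = int(status[0]) except: pass; then isinstance(status, int)
  let i : Int :=
    match (PySem.Str.pyGet? status 0).bind
            (fun ch => PySem.Int.ofStr? (String.ofList [ch])) with
    | some n => n
    | none => (index.lookup (PySem.Str.replace status "-" "")).getD 0
  if 1 ≤ i ∧ i ≤ 7 then
    PySem.Int.toStr i ++ " - " ++ ((PySem.List.pyGet? names (i - 1)).getD "")
  else ""   -- Source B raises ValueError here; excluded by Pre_

-- ===== PRECONDITION & SPEC =====
-- Pre_ = exactly the inputs on which Python A returns: first char a digit 1-7, or the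
-- string is one of the dict's lowercase name keys; elsewhere A raises (the KeyError path
-- re-raises via the broken multi-argument ''.join, a TypeError).
def Pre_interpret_dev_status (status : String) : Prop :=
  (status.toList.head?.any (fun c => c ∈ ['1', '2', '3', '4', '5', '6', '7'])) = true
  ∨ status ∈ ["planning", "pre-alpha", "prealpha", "alpha", "beta",
              "production/stable", "production", "stable", "mature", "inactive"]
instance (status : String) : Decidable (Pre_interpret_dev_status status) := by
  unfold Pre_interpret_dev_status; infer_instance

def pvWitness_interpret_dev_status : String := "pre-alpha"

def Spec_interpret_dev_status (status : String) (out : String) : Prop := out = interpret_dev_status_alt status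
instance (status : String) (out : String) : Decidable (Spec_interpret_dev_status status out) := by unfold Spec_interpret_dev_status; infer_instance

-- ===== CLAIM (what is proved, stated in full; the proofs are below) =====
def Claim_equal_interpret_dev_status : Prop := ∀ (status : String), Dom_interpret_dev_status status → Pre_interpret_dev_status status → Spec_interpret_dev_status status (interpret_dev_status status)

-- ===== LEMMAS AND PROOFS =====

theorem digit_case (c : Char) (rest : List Char)
    (h : c ∈ ['1', '2', '3', '4', '5', '6', '7']) :
    interpret_dev_status (String.ofList (c :: rest))
      = interpret_dev_status_alt (String.ofList (c :: rest)) := by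
  fin_cases h <;>
    simp only [interpret_dev_status, interpret_dev_status_alt,
      PySem.Str.pyGet?_eq, String.toList_ofList,
      PySem.Chars.pyGet?_eq_listPyGet?, PySem.List.pyGet?_zero_cons,
      Option.bind_some,
      show PySem.Int.ofStr? (String.ofList ['1']) = some 1 from by decide,
      show PySem.Int.ofStr? (String.ofList ['2']) = some 2 from by decide,
      show PySem.Int.ofStr? (String.ofList ['3']) = some 3 from by decide,
      show PySem.Int.ofStr? (String.ofList ['4']) = some 4 from by decide,
      show PySem.Int.ofStr? (String.ofList ['5']) = some 5 from by decide,
      show PySem.Int.ofStr? (String.ofList ['6']) = some 6 from by decide,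
      show PySem.Int.ofStr? (String.ofList ['7']) = some 7 from by decide] <;>
    decide

-- ===== VERDICT (by name: the statement is the Claim_ definition above) =====
theorem interpret_dev_status_spec : Claim_equal_interpret_dev_status := by
  intro status _ hpre
  unfold Spec_interpret_dev_status
  rcases hpre with hd | hmem
  · obtain ⟨l, rfl⟩ : ∃ l, String.ofList l = status := ⟨status.toList, String.ofList_toList⟩
    cases l with
    | nil => simp at hd
    | cons c rest =>
        simp [Option.any] at hd
        exact digit_case c rest (by simpa using hd)
  · simp only [List.mem_cons, List.not_mem_nil, or_false] at hmem
    rcases hmem with rfl | rfl | rfl | rfl | rfl | rfl | rfl | rfl | rfl | rfl <;> decide
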